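-- pv_equiv track=rewrite | github.com/a2n-s/tetris-couleur | tetris_couleur.py | calculerScoreCreature
-- ===== SOURCE A (Python) =====
-- def alignementDansCreature(rangee : list) -> tuple:
--     n = len(rangee)
--
--     nombre_alignements = 0
--     longueur = 0
--     valeur = rangee[0]
--     for bloc in rangee:
--         if valeur == bloc:
--             longueur += 1
--         else:
--             if longueur >= 3 and valeur: nombre_alignements += 1
--             longueur = 1
--             valeur = bloc
--     if longueur >= 3 and valeur:
--         nombre_alignements += 1
--
--     return nombre_alignements
--
-- def scoreRangeeCreature(creature : list, i: int, j : int, dx : int, dy : int) -> int: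
--     def creerRangee(creature : list, i: int, j : int, dx : int, dy : int) -> list:
--         rangee = []
--         largeur = len(creature)
--         hauteur = len(creature[0])
--         x, y = i, j
--         while 0 <= x < largeur and 0 <= y < hauteur:
--             rangee.append(creature[x][y])
--             x += dx
--             y += dy
--         return rangee
--
--     return alignementDansCreature(creerRangee(creature, i, j, dx, dy))
--
-- def calculerScoreCreature(creature : list) -> int:
--     largeur = len(creature)
--     hauteur = len(creature[0])
--     nombre_alignements = []
--
--     def inspecterRangee(creature : list, i: int, j : int, dx : int, dy : int, nombre_alignements : list) -> None:
--         n_a = scoreRangeeCreature(creature, i, j, dx, dy)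
--         nombre_alignements.append(n_a)
--
--     inspecterRangee(creature, 0, 0, 0, 1, nombre_alignements)
--     if largeur != 1:
--         inspecterRangee(creature, largeur - 1, 0, 0, 1, nombre_alignements)
--
--     for x in range(1, largeur - 1):
--         inspecterRangee(creature, x, 0, 0,  1, nombre_alignements)
--         inspecterRangee(creature, x, 0, 1,  1, nombre_alignements)
--         inspecterRangee(creature, x, 0, -1, 1, nombre_alignements)
--
--     for y in range(hauteur):
--         inspecterRangee(creature, 0, y, 1, 0, nombre_alignements)
--         inspecterRangee(creature, 0, y, 1, 1, nombre_alignements)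
--
--         inspecterRangee(creature, largeur - 1, y, -1, 1, nombre_alignements)
--
--     return sum([sum(colonne) for colonne in creature]), sum(nombre_alignements)
-- ===== SOURCE B (Python) =====
-- def runsDansLigne(ligne):
--     # number of maximal runs of length >= 3 of equal truthy values
--     if not ligne:
--         return 0
--     k = 1
--     while k < len(ligne) and ligne[k] == ligne[0]:
--         k += 1
--     return (1 if k >= 3 and ligne[0] else 0) + runsDansLigne(ligne[k:])
--
-- def calculerScoreCreature(creature):
--     L, H = len(creature), len(creature[0])
--     total = sum(sum(row) for row in creature)
--     aligns = (
--         sum(runsDansLigne(row) for row in creature)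
--         + sum(runsDansLigne([row[y] for row in creature]) for y in range(H))
--         + sum(runsDansLigne([creature[x][x - k] for x in range(max(0, k), min(L, H + k))])
--               for k in range(-(H - 1), L))
--         + sum(runsDansLigne([creature[s - y][y] for y in range(max(0, s - L + 1), min(H, s + 1))])
--               for s in range(L + H - 1))
--     )
--     return total, aligns
-- ===== Notes on version B (the rewrite author's own statement) =====
-- stated objective: simpler
-- what changed: A walks each line from hand-picked start cells with a while-loop tracer and a stateful (longueur, valeur) run detector, appending per-line scores to an accumulator list; B instead generates the four line families (rows, columns, x-y diagonals, x+y anti-diagonals) as closed-form index comprehensions and counts maximal runs with a recursive leading-run splitter, summing counts directly.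
-- outside the precondition, e.g. on calculerScoreCreature([[5], [5, 5, 5], [5, 5, 5]]): A returns (35, 1), B returns (35, 3); on calculerScoreCreature([]): A raises IndexError, B raises IndexError; on calculerScoreCreature([[1, 2], [1]]): A raises IndexError, B raises IndexError
import Mathlib
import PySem

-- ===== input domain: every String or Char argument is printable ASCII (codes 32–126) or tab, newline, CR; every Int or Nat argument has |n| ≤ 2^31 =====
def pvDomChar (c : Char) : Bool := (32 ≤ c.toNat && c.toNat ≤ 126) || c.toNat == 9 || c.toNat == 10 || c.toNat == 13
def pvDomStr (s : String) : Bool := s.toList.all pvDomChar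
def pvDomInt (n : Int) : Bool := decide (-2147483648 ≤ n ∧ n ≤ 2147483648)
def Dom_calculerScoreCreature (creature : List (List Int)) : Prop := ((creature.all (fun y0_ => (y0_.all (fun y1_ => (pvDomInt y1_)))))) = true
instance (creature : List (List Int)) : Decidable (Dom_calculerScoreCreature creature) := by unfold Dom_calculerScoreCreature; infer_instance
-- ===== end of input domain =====

-- B replaces A's start-cell walker (while-loop line tracing plus a stateful run detector and an
-- accumulator list) by closed-form comprehensions for the four line families and a recursive
-- maximal-run counter; objective: simpler, not faster.

-- ===== PORT A =====
-- creature[x][y]: both programs index with nonnegative in-range indices under Pre_;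
-- PySem.List.pyGetD is Python's xs[i] made total (exact under Pre_, which rules out IndexError)
def pvCell (creature : List (List Int)) (x y : Int) : Int :=
  PySem.List.pyGetD (PySem.List.pyGetD creature x []) y 0

-- the for-loop of alignementDansCreature over (nombre_alignements, longueur, valeur)
def alignLoop (nb longueur valeur : Int) : List Int → Int
  | [] => if 3 ≤ longueur ∧ valeur ≠ 0 then nb + 1 else nb
  | b :: reste =>
    if valeur = b then alignLoop nb (longueur + 1) valeur reste
    else alignLoop (if 3 ≤ longueur ∧ valeur ≠ 0 then nb + 1 else nb) 1 b reste

-- rangee[0] raises IndexError on an empty line; under Pre_ every line handed to it is nonempty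
def alignementDansCreature (rangee : List Int) : Int :=
  alignLoop 0 0 (PySem.List.pyGetD rangee 0 0) rangee

-- the while loop of creerRangee; fuel = largeur + hauteur bounds its iteration count for every
-- direction this program uses (each step moves x or y by one inside [0,largeur)×[0,hauteur)),
-- so the fueled loop is exact
def creerRangee (creature : List (List Int)) (fuel : Nat) (x y dx dy : Int) : List Int :=
  match fuel with
  | 0 => []
  | fuel + 1 =>
    if 0 ≤ x ∧ x < (creature.length : Int) ∧ 0 ≤ y ∧
        y < ((PySem.List.pyGetD creature 0 []).length : Int) then
      pvCell creature x y :: creerRangee creature fuel (x + dx) (y + dy) dx dy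
    else []

def scoreRangeeCreature (creature : List (List Int)) (i j dx dy : Int) : Int :=
  alignementDansCreature
    (creerRangee creature (creature.length + (PySem.List.pyGetD creature 0 []).length) i j dx dy)

def calculerScoreCreature (creature : List (List Int)) : Int × Int :=
  let largeur : Int := creature.length
  let hauteur : Int := (PySem.List.pyGetD creature 0 []).length
  let na0 : List Int := [scoreRangeeCreature creature 0 0 0 1]
  let na1 : List Int :=
    if largeur ≠ 1 then na0 ++ [scoreRangeeCreature creature (largeur - 1) 0 0 1] else na0
  let na2 : List Int :=
    (PySem.List.pyRange 1 (largeur - 1) 1).foldl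
      (fun acc x => acc ++ [scoreRangeeCreature creature x 0 0 1,
        scoreRangeeCreature creature x 0 1 1, scoreRangeeCreature creature x 0 (-1) 1]) na1
  let na3 : List Int :=
    (PySem.List.pyRange 0 hauteur 1).foldl
      (fun acc y => acc ++ [scoreRangeeCreature creature 0 y 1 0,
        scoreRangeeCreature creature 0 y 1 1,
        scoreRangeeCreature creature (largeur - 1) y (-1) 1]) na2
  ((creature.map (fun colonne => colonne.sum)).sum, na3.sum)

-- ===== PORT B =====
-- runsDansLigne: the inner while advancing k over the leading run is takeWhile/dropWhile,
-- the recursive call is on ligne[k:]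
def runsDansLigne : List Int → Int
  | [] => 0
  | v :: reste =>
    (if 3 ≤ (reste.takeWhile (fun b => v == b)).length + 1 ∧ v ≠ 0 then 1 else 0)
      + runsDansLigne (reste.dropWhile (fun b => v == b))
termination_by l => l.length
decreasing_by
  have := List.length_dropWhile_le (fun b => v == b) reste
  simp only [List.length_cons]
  omega

def calculerScoreCreature_alt (creature : List (List Int)) : Int × Int :=
  let L : Int := creature.length
  let H : Int := (PySem.List.pyGetD creature 0 []).length
  let total : Int := (creature.map (fun row => row.sum)).sum
  let aligns : Int :=
    (creature.map (fun row => runsDansLigne row)).sum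
    + ((PySem.List.pyRange 0 H 1).map (fun y =>
        runsDansLigne (creature.map (fun row => PySem.List.pyGetD row y 0)))).sum
    + ((PySem.List.pyRange (-(H - 1)) L 1).map (fun k =>
        runsDansLigne ((PySem.List.pyRange (max 0 k) (min L (H + k)) 1).map
          (fun x => pvCell creature x (x - k))))).sum
    + ((PySem.List.pyRange 0 (L + H - 1) 1).map (fun s =>
        runsDansLigne ((PySem.List.pyRange (max 0 (s - L + 1)) (min H (s + 1)) 1).map
          (fun y => pvCell creature (s - y) y)))).sum
  (total, aligns)

-- ===== PRECONDITION & SPEC =====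
-- Pre_ restricts to nonempty rectangular grids: A raises IndexError on an empty grid, an empty
-- first row, or a grid with some row shorter than the first; on ragged grids whose later rows are
-- longer A still returns, truncating every scanned line at the first row's width while summing the
-- full rows — an artefact of reading the height from row 0 — and those inputs are excluded too.
def Pre_calculerScoreCreature (creature : List (List Int)) : Prop :=
  creature ≠ [] ∧ (creature.headD []).length ≠ 0 ∧
    ∀ row ∈ creature, row.length = (creature.headD []).length
instance (creature : List (List Int)) : Decidable (Pre_calculerScoreCreature creature) := by
  unfold Pre_calculerScoreCreature; infer_instance

def pvWitness_calculerScoreCreature : List (List Int) := [[1, 1, 1], [0, 2, 1], [1, 1, 1]]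

def Spec_calculerScoreCreature (creature : List (List Int)) (out : Int × Int) : Prop := out = calculerScoreCreature_alt creature
instance (creature : List (List Int)) (out : Int × Int) : Decidable (Spec_calculerScoreCreature creature out) := by unfold Spec_calculerScoreCreature; infer_instance

-- ===== CLAIM (what is proved, stated in full; the proofs are below) =====
def Claim_equal_calculerScoreCreature : Prop := ∀ (creature : List (List Int)), Dom_calculerScoreCreature creature → Pre_calculerScoreCreature creature → Spec_calculerScoreCreature creature (calculerScoreCreature creature)

-- ===== LEMMAS AND PROOFS =====

-- the four line families, in the normal form both ports are reduced to
def pvRowLine (c : List (List Int)) (x : Int) : List Int :=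
  (PySem.List.pyRange 0 ((PySem.List.pyGetD c 0 []).length : Int) 1).map (fun t => pvCell c x t)

def pvColLine (c : List (List Int)) (y : Int) : List Int :=
  (PySem.List.pyRange 0 (c.length : Int) 1).map (fun t => pvCell c t y)

def pvDiagLine (c : List (List Int)) (k : Int) : List Int :=
  (PySem.List.pyRange 0
      (min ((c.length : Int) - max 0 k) (((PySem.List.pyGetD c 0 []).length : Int) - max 0 (-k))) 1).map
    (fun t => pvCell c (max 0 k + t) (max 0 (-k) + t))

def pvAntiLine (c : List (List Int)) (s : Int) : List Int :=
  (PySem.List.pyRange 0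
      (min (s - max 0 (s - (c.length : Int) + 1) + 1)
        (((PySem.List.pyGetD c 0 []).length : Int) - max 0 (s - (c.length : Int) + 1))) 1).map
    (fun t => pvCell c (s - max 0 (s - (c.length : Int) + 1) - t) (max 0 (s - (c.length : Int) + 1) + t))

-- unfolding equation of the well-founded runsDansLigne
lemma runsDansLigne_cons (v : Int) (reste : List Int) :
    runsDansLigne (v :: reste) =
      (if 3 ≤ (reste.takeWhile (fun b => v == b)).length + 1 ∧ v ≠ 0 then 1 else 0)
        + runsDansLigne (reste.dropWhile (fun b => v == b)) := by
  rw [runsDansLigne]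

lemma runsDansLigne_singleton (v : Int) : runsDansLigne [v] = 0 := by
  rw [runsDansLigne_cons]
  simp [runsDansLigne]

-- what A's fold computes, in terms of B's run counter
lemma alignLoop_eq (xs : List Int) : ∀ (nb lg v : Int),
    alignLoop nb lg v xs =
      nb + (if 3 ≤ lg + ((xs.takeWhile (fun b => v == b)).length : Int) ∧ v ≠ 0 then 1 else 0)
        + runsDansLigne (xs.dropWhile (fun b => v == b)) := by
  induction xs with
  | nil =>
    intro nb lg v
    simp only [List.takeWhile_nil, List.dropWhile_nil, List.length_nil, alignLoop, runsDansLigne]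
    push_cast
    split_ifs <;> omega
  | cons b bs ih =>
    intro nb lg v
    by_cases hvb : v = b
    · rw [List.takeWhile_cons_of_pos (by simp [hvb]), List.dropWhile_cons_of_pos (by simp [hvb])]
      simp only [alignLoop, List.length_cons, if_pos hvb]
      rw [ih nb (lg + 1) v]
      generalize runsDansLigne (List.dropWhile (fun b => v == b) bs) = r
      push_cast
      split_ifs <;> omega
    · rw [List.takeWhile_cons_of_neg (by simp [hvb]), List.dropWhile_cons_of_neg (by simp [hvb])]
      simp only [alignLoop, List.length_nil, if_neg hvb]
      rw [ih _ 1 b, runsDansLigne_cons]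
      generalize runsDansLigne (List.dropWhile (fun b' => b == b') bs) = r
      push_cast
      split_ifs <;> omega

-- A's per-line score is B's run counter, on a nonempty line
lemma alignement_eq_runs (l : List Int) (h : l ≠ []) :
    alignementDansCreature l = runsDansLigne l := by
  match l with
  | v :: xs =>
    show alignLoop 0 0 (PySem.List.pyGetD (v :: xs) 0 0) (v :: xs) = _
    rw [PySem.List.pyGetD_zero_cons]
    simp only [alignLoop]
    rw [alignLoop_eq xs 0 (0 + 1) v, runsDansLigne_cons]
    generalize runsDansLigne (List.dropWhile (fun b => v == b) xs) = r
    push_cast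
    split_ifs <;> omega

-- shifting the start of an integer range under map
lemma map_pyRange_shift {α : Type} (f : Int → α) (a b : Int) :
    (PySem.List.pyRange a b 1).map f
      = (PySem.List.pyRange 0 (b - a) 1).map (fun t => f (a + t)) := by
  rw [PySem.List.pyRange_one, PySem.List.pyRange_one]
  simp [List.map_map]

-- pyRange-map sums as Finset sums over Finset.Ico
lemma sum_map_pyRange (f : Int → Int) (a b : Int) :
    ((PySem.List.pyRange a b 1).map f).sum = ∑ i ∈ Finset.Ico a b, f i := by
  rw [Int.Ico_eq_finset_map, Finset.sum_map, PySem.List.pyRange_one, List.map_map]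
  have h : ∀ (n : Nat) (g : Nat → Int),
      ((List.range n).map g).sum = ∑ i ∈ Finset.range n, g i := by
    intro n g
    induction n with
    | zero => simp
    | succ m ih => rw [List.range_succ, Finset.sum_range_succ, List.map_append, List.sum_append, ih]; simp
  rw [h]
  apply Finset.sum_congr rfl
  intro i _
  simp

lemma sumIco_split (f : Int → Int) {a b c : Int} (h1 : a ≤ b) (h2 : b ≤ c) :
    (∑ i ∈ Finset.Ico a b, f i) + ∑ i ∈ Finset.Ico b c, f i = ∑ i ∈ Finset.Ico a c, f i := by
  rw [← Finset.sum_union (Finset.Ico_disjoint_Ico_consecutive a b c),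
    Finset.Ico_union_Ico_eq_Ico h1 h2]

lemma sumIco_single (f : Int → Int) {a b : Int} (h : b = a + 1) :
    (∑ i ∈ Finset.Ico a b, f i) = f a := by
  subst h
  have h2 : Finset.Ico a (a + 1) = {a} := by
    ext x; simp [Finset.mem_Ico]; omega
  rw [h2, Finset.sum_singleton]

lemma sumIco_neg (f : Int → Int) (H : Int) :
    (∑ y ∈ Finset.Ico 0 H, f (-y)) = ∑ k ∈ Finset.Ico (1 - H) 1, f k := by
  apply Finset.sum_nbij' (i := fun y => -y) (j := fun k => -k) <;>
    intro a ha <;> simp [Finset.mem_Ico] at * <;> omega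

lemma sumIco_shift (f : Int → Int) (c H : Int) :
    (∑ y ∈ Finset.Ico 0 H, f (c + y)) = ∑ s ∈ Finset.Ico c (c + H), f s := by
  apply Finset.sum_nbij' (i := fun y => c + y) (j := fun s => s - c) <;>
    intro a ha <;> simp [Finset.mem_Ico] at * <;> omega

lemma sum_if_append (P : Prop) [Decidable P] (l1 l2 : List Int) :
    (if P then l1 ++ l2 else l1).sum = l1.sum + (if P then l2.sum else 0) := by
  split_ifs <;> simp

-- sums of the three-element blocks A's loops append
lemma sum_flatMap_triple (l : List Int) (f g h : Int → Int) :
    (l.flatMap (fun y => [f y, g y, h y])).sum = (l.map (fun y => f y + (g y + h y))).sum := by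
  induction l with
  | nil => rfl
  | cons a l ih => simp [List.flatMap_cons, ih]; ring

-- a map over a list of rows as an index loop
lemma map_eq_map_pyRange {β : Type} (l : List (List Int)) (g : List Int → β) :
    l.map g = (PySem.List.pyRange 0 (l.length : Int) 1).map
      (fun j => g (PySem.List.pyGetD l j [])) := by
  conv_lhs => rw [← PySem.List.map_pyGetD_pyRange_zero' l ([] : List Int)]
  rw [List.map_map]
  rfl

-- the four trace lemmas: the fueled while loop, per direction
lemma creer_right (c : List (List Int)) (fuel : Nat) (x y : Int)
    (hx0 : 0 ≤ x) (hxL : x < (c.length : Int)) (hy : 0 ≤ y)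
    (hf : (((PySem.List.pyGetD c 0 []).length : Int) - y).toNat ≤ fuel) :
    creerRangee c fuel x y 0 1
      = (PySem.List.pyRange 0 (((PySem.List.pyGetD c 0 []).length : Int) - y) 1).map
          (fun t => pvCell c x (y + t)) := by
  induction fuel generalizing y with
  | zero =>
    rw [PySem.List.pyRange_one_eq_nil (by omega)]
    simp [creerRangee]
  | succ n ih =>
    by_cases hcond : y < ((PySem.List.pyGetD c 0 []).length : Int)
    · rw [creerRangee, if_pos ⟨hx0, hxL, hy, hcond⟩, show x + (0 : Int) = x from by ring]
      have hfu : (((PySem.List.pyGetD c 0 []).length : Int) - (y + 1)).toNat ≤ n := by omega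
      rw [ih (y + 1) (by omega) hfu]
      simp only [PySem.List.pyRange_one_cons
        (show (0 : Int) < ((PySem.List.pyGetD c 0 []).length : Int) - y from by omega),
        List.map_cons, add_zero, zero_add]
      rw [map_pyRange_shift (fun t => pvCell c x (y + t)) 1]
      refine congrArg₂ List.cons rfl ?_
      rw [show ((PySem.List.pyGetD c 0 []).length : Int) - y - 1
          = ((PySem.List.pyGetD c 0 []).length : Int) - (y + 1) from by ring]
      apply List.map_congr_left
      intro t _
      have e2 : y + 1 + t = y + (1 + t) := by ring
      rw [e2]
    · rw [creerRangee, if_neg (fun h => hcond h.2.2.2),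
        PySem.List.pyRange_one_eq_nil (by omega)]
      rfl

lemma creer_down (c : List (List Int)) (fuel : Nat) (x y : Int)
    (hx0 : 0 ≤ x) (hy0 : 0 ≤ y) (hyH : y < ((PySem.List.pyGetD c 0 []).length : Int))
    (hf : ((c.length : Int) - x).toNat ≤ fuel) :
    creerRangee c fuel x y 1 0
      = (PySem.List.pyRange 0 ((c.length : Int) - x) 1).map (fun t => pvCell c (x + t) y) := by
  induction fuel generalizing x with
  | zero =>
    rw [PySem.List.pyRange_one_eq_nil (by omega)]
    simp [creerRangee]
  | succ n ih =>
    by_cases hcond : x < (c.length : Int)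
    · rw [creerRangee, if_pos ⟨hx0, hcond, hy0, hyH⟩, show y + (0 : Int) = y from by ring]
      have hfu : ((c.length : Int) - (x + 1)).toNat ≤ n := by omega
      rw [ih (x + 1) (by omega) hfu]
      simp only [PySem.List.pyRange_one_cons
        (show (0 : Int) < (c.length : Int) - x from by omega),
        List.map_cons, add_zero, zero_add]
      rw [map_pyRange_shift (fun t => pvCell c (x + t) y) 1]
      refine congrArg₂ List.cons rfl ?_
      rw [show (c.length : Int) - x - 1 = (c.length : Int) - (x + 1) from by ring]
      apply List.map_congr_left
      intro t _
      have e1 : x + 1 + t = x + (1 + t) := by ring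
      rw [e1]
    · rw [creerRangee, if_neg (fun h => hcond h.2.1),
        PySem.List.pyRange_one_eq_nil (by omega)]
      rfl

lemma creer_diag (c : List (List Int)) (fuel : Nat) (x y : Int)
    (hx0 : 0 ≤ x) (hy0 : 0 ≤ y)
    (hf : (min ((c.length : Int) - x) (((PySem.List.pyGetD c 0 []).length : Int) - y)).toNat ≤ fuel) :
    creerRangee c fuel x y 1 1
      = (PySem.List.pyRange 0
            (min ((c.length : Int) - x) (((PySem.List.pyGetD c 0 []).length : Int) - y)) 1).map
          (fun t => pvCell c (x + t) (y + t)) := by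
  induction fuel generalizing x y with
  | zero =>
    rw [PySem.List.pyRange_one_eq_nil (by omega)]
    simp [creerRangee]
  | succ n ih =>
    by_cases hcond : x < (c.length : Int) ∧ y < ((PySem.List.pyGetD c 0 []).length : Int)
    · obtain ⟨hc1, hc2⟩ := hcond
      rw [creerRangee, if_pos ⟨hx0, hc1, hy0, hc2⟩]
      have hfu : (min ((c.length : Int) - (x + 1))
          (((PySem.List.pyGetD c 0 []).length : Int) - (y + 1))).toNat ≤ n := by omega
      rw [ih (x + 1) (y + 1) (by omega) (by omega) hfu]
      simp only [PySem.List.pyRange_one_cons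
        (show (0 : Int) < min ((c.length : Int) - x)
          (((PySem.List.pyGetD c 0 []).length : Int) - y) from by omega),
        List.map_cons, add_zero, zero_add]
      rw [map_pyRange_shift (fun t => pvCell c (x + t) (y + t)) 1]
      refine congrArg₂ List.cons rfl ?_
      rw [show min ((c.length : Int) - x) (((PySem.List.pyGetD c 0 []).length : Int) - y) - 1
          = min ((c.length : Int) - (x + 1))
              (((PySem.List.pyGetD c 0 []).length : Int) - (y + 1)) from by omega]
      apply List.map_congr_left
      intro t _
      have e1 : x + 1 + t = x + (1 + t) := by ring
      have e2 : y + 1 + t = y + (1 + t) := by ring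
      rw [e1, e2]
    · rw [creerRangee, if_neg (fun h => hcond ⟨h.2.1, h.2.2.2⟩),
        PySem.List.pyRange_one_eq_nil (by omega)]
      rfl

lemma creer_anti (c : List (List Int)) (fuel : Nat) (x y : Int)
    (hxL : x < (c.length : Int)) (hy0 : 0 ≤ y)
    (hf : (min (x + 1) (((PySem.List.pyGetD c 0 []).length : Int) - y)).toNat ≤ fuel) :
    creerRangee c fuel x y (-1) 1
      = (PySem.List.pyRange 0
            (min (x + 1) (((PySem.List.pyGetD c 0 []).length : Int) - y)) 1).map
          (fun t => pvCell c (x - t) (y + t)) := by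
  induction fuel generalizing x y with
  | zero =>
    rw [PySem.List.pyRange_one_eq_nil (by omega)]
    simp [creerRangee]
  | succ n ih =>
    by_cases hcond : 0 ≤ x ∧ y < ((PySem.List.pyGetD c 0 []).length : Int)
    · obtain ⟨hc1, hc2⟩ := hcond
      rw [creerRangee, if_pos ⟨hc1, hxL, hy0, hc2⟩, show x + (-1 : Int) = x - 1 from by ring]
      have hfu : (min (x - 1 + 1)
          (((PySem.List.pyGetD c 0 []).length : Int) - (y + 1))).toNat ≤ n := by omega
      rw [ih (x - 1) (y + 1) (by omega) (by omega) hfu]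
      simp only [PySem.List.pyRange_one_cons
        (show (0 : Int) < min (x + 1)
          (((PySem.List.pyGetD c 0 []).length : Int) - y) from by omega),
        List.map_cons, add_zero, zero_add, sub_zero]
      rw [map_pyRange_shift (fun t => pvCell c (x - t) (y + t)) 1]
      refine congrArg₂ List.cons rfl ?_
      rw [show min (x + 1) (((PySem.List.pyGetD c 0 []).length : Int) - y) - 1
          = min (x - 1 + 1) (((PySem.List.pyGetD c 0 []).length : Int) - (y + 1)) from by omega]
      apply List.map_congr_left
      intro t _
      have e1 : x - 1 - t = x - (1 + t) := by ring
      have e2 : y + 1 + t = y + (1 + t) := by ring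
      rw [e1, e2]
    · rw [creerRangee, if_neg (fun h => hcond ⟨h.1, h.2.2.2⟩),
        PySem.List.pyRange_one_eq_nil (by omega)]
      rfl

-- sum rearrangement: A's row starts cover Ico 0 L
lemma rows_split (f : Int → Int) (L : Int) (hL : 1 ≤ L) :
    f 0 + (if L ≠ 1 then f (L - 1) else 0) + ∑ x ∈ Finset.Ico 1 (L - 1), f x
      = ∑ x ∈ Finset.Ico 0 L, f x := by
  by_cases h1 : L = 1
  · subst h1
    rw [if_neg (by omega), Finset.Ico_eq_empty (by omega : ¬(1 : Int) < 1 - 1), Finset.sum_empty,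
      sumIco_single f (by norm_num : (1 : Int) = 0 + 1)]
    ring
  · rw [if_pos h1]
    have e1 := sumIco_split f (show (0 : Int) ≤ 1 by omega) (show (1 : Int) ≤ L by omega)
    have e2 := sumIco_split f (show (1 : Int) ≤ L - 1 by omega) (show L - 1 ≤ L by omega)
    have s1 := sumIco_single f (show (1 : Int) = 0 + 1 by norm_num)
    have s2 := sumIco_single f (show L = (L - 1) + 1 by ring)
    linarith

-- A's diagonal starts cover all (x−y)-diagonals but the bottom-left singleton
lemma diag_cover (f : Int → Int) (L H : Int) (hL : 1 ≤ L) (hH : 1 ≤ H)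
    (hsing : L ≠ 1 → f (L - 1) = 0) :
    (∑ k ∈ Finset.Ico 1 (L - 1), f k) + ∑ k ∈ Finset.Ico (1 - H) 1, f k
      = ∑ k ∈ Finset.Ico (1 - H) L, f k := by
  by_cases h1 : L = 1
  · subst h1
    rw [Finset.Ico_eq_empty (by omega : ¬(1 : Int) < 1 - 1), Finset.sum_empty, zero_add]
  · have e1 := sumIco_split f (show 1 - H ≤ 1 by omega) (show (1 : Int) ≤ L by omega)
    have e2 := sumIco_split f (show (1 : Int) ≤ L - 1 by omega) (show L - 1 ≤ L by omega)
    have s2 := sumIco_single f (show L = (L - 1) + 1 by ring)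
    have hz := hsing h1
    linarith

-- A's anti-diagonal starts cover all (x+y)-anti-diagonals but the top-left singleton
lemma anti_cover (f : Int → Int) (L H : Int) (hL : 1 ≤ L) (hH : 1 ≤ H)
    (hsing : L ≠ 1 → f 0 = 0) :
    (∑ s ∈ Finset.Ico 1 (L - 1), f s) + ∑ s ∈ Finset.Ico (L - 1) (L + H - 1), f s
      = ∑ s ∈ Finset.Ico 0 (L + H - 1), f s := by
  by_cases h1 : L = 1
  · subst h1
    rw [Finset.Ico_eq_empty (by omega : ¬(1 : Int) < 1 - 1), Finset.sum_empty, zero_add,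
      show (1 : Int) - 1 = 0 from by norm_num]
  · have e1 := sumIco_split f (show (0 : Int) ≤ 1 by omega) (show (1 : Int) ≤ L + H - 1 by omega)
    have e2 := sumIco_split f (show (1 : Int) ≤ L - 1 by omega) (show L - 1 ≤ L + H - 1 by omega)
    have s1 := sumIco_single f (show (1 : Int) = 0 + 1 by norm_num)
    have hz := hsing h1
    linarith

-- ===== VERDICT (by name: the statement is the Claim_ definition above) =====
theorem calculerScoreCreature_spec : Claim_equal_calculerScoreCreature := by
  intro c hDom hPre
  unfold Spec_calculerScoreCreature
  obtain ⟨hne, hH0, hrect⟩ := hPre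
  have hLpos : 0 < c.length := by cases c with
    | nil => exact absurd rfl hne
    | cons r0 rest => simp
  have hhead : PySem.List.pyGetD c 0 [] = c.headD [] := by
    cases c with
    | nil => exact absurd rfl hne
    | cons r0 rest => rw [PySem.List.pyGetD_zero_cons]; rfl
  have hHpos : 0 < (PySem.List.pyGetD c 0 []).length := by rw [hhead]; omega
  have hL1 : (1 : Int) ≤ (c.length : Int) := by omega
  have hH1 : (1 : Int) ≤ ((PySem.List.pyGetD c 0 []).length : Int) := by omega
  have hrowlen : ∀ x : Int, 0 ≤ x → x < (c.length : Int) →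
      ((PySem.List.pyGetD c x []).length : Int) = ((PySem.List.pyGetD c 0 []).length : Int) := by
    intro x h0 hx
    have hmem : PySem.List.pyGetD c x [] ∈ c :=
      PySem.List.pyGetD_mem c [] (by unfold PySem.Raise.InRange; omega)
    have h2 : (PySem.List.pyGetD c x []).length = (PySem.List.pyGetD c 0 []).length := by
      rw [hrect _ hmem, hhead]
    exact_mod_cast h2
  have hrowline : ∀ x : Int, 0 ≤ x → x < (c.length : Int) →
      pvRowLine c x = PySem.List.pyGetD c x [] := by
    intro x h0 hx
    unfold pvRowLine pvCell
    rw [show ((PySem.List.pyGetD c 0 []).length : Int)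
        = ((PySem.List.pyGetD c x []).length : Int) from (hrowlen x h0 hx).symm]
    exact PySem.List.map_pyGetD_pyRange_zero' (PySem.List.pyGetD c x []) 0
  have hne_line : ∀ (n : Int) (g : Int → Int), 1 ≤ n →
      (PySem.List.pyRange 0 n 1).map g ≠ [] := by
    intro n g hn h
    have hlen := congrArg List.length h
    rw [List.length_map, PySem.List.length_pyRange_one] at hlen
    simp at hlen
    omega
  -- A's per-line scores as run counts of the normal-form lines
  have hSrow : ∀ x : Int, 0 ≤ x → x < (c.length : Int) →
      scoreRangeeCreature c x 0 0 1 = runsDansLigne (pvRowLine c x) := by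
    intro x h0 hx
    unfold scoreRangeeCreature
    rw [creer_right c _ x 0 h0 hx (by omega) (by omega)]
    rw [alignement_eq_runs _ (hne_line _ _ (by omega))]
    unfold pvRowLine
    rw [sub_zero]
    refine congrArg _ (List.map_congr_left fun t _ => ?_)
    rw [zero_add]
  have hScol : ∀ y : Int, 0 ≤ y → y < ((PySem.List.pyGetD c 0 []).length : Int) →
      scoreRangeeCreature c 0 y 1 0 = runsDansLigne (pvColLine c y) := by
    intro y h0 hy
    unfold scoreRangeeCreature
    rw [creer_down c _ 0 y (by omega) h0 hy (by omega)]
    rw [alignement_eq_runs _ (hne_line _ _ (by omega))]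
    unfold pvColLine
    rw [sub_zero]
    refine congrArg _ (List.map_congr_left fun t _ => ?_)
    rw [zero_add]
  have hSdiag1 : ∀ x : Int, 0 ≤ x → x < (c.length : Int) →
      scoreRangeeCreature c x 0 1 1 = runsDansLigne (pvDiagLine c x) := by
    intro x h0 hx
    unfold scoreRangeeCreature
    rw [creer_diag c _ x 0 h0 (by omega) (by omega)]
    rw [alignement_eq_runs _ (hne_line _ _ (by omega))]
    unfold pvDiagLine
    rw [show max 0 x = x from by omega, show max 0 (-x) = 0 from by omega]
  have hSdiag2 : ∀ y : Int, 0 ≤ y → y < ((PySem.List.pyGetD c 0 []).length : Int) →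
      scoreRangeeCreature c 0 y 1 1 = runsDansLigne (pvDiagLine c (-y)) := by
    intro y h0 hy
    unfold scoreRangeeCreature
    rw [creer_diag c _ 0 y (by omega) h0 (by omega)]
    rw [alignement_eq_runs _ (hne_line _ _ (by omega))]
    unfold pvDiagLine
    rw [neg_neg, show max 0 (-y) = 0 from by omega, show max 0 y = y from by omega]
  have hSanti1 : ∀ x : Int, 0 ≤ x → x < (c.length : Int) →
      scoreRangeeCreature c x 0 (-1) 1 = runsDansLigne (pvAntiLine c x) := by
    intro x h0 hx
    unfold scoreRangeeCreature
    rw [creer_anti c _ x 0 hx (by omega) (by omega)]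
    rw [alignement_eq_runs _ (hne_line _ _ (by omega))]
    unfold pvAntiLine
    rw [show max 0 (x - (c.length : Int) + 1) = 0 from by omega]
    simp only [sub_zero]
  have hSanti2 : ∀ y : Int, 0 ≤ y → y < ((PySem.List.pyGetD c 0 []).length : Int) →
      scoreRangeeCreature c ((c.length : Int) - 1) y (-1) 1
        = runsDansLigne (pvAntiLine c ((c.length : Int) - 1 + y)) := by
    intro y h0 hy
    unfold scoreRangeeCreature
    rw [creer_anti c _ ((c.length : Int) - 1) y (by omega) h0 (by omega)]
    rw [alignement_eq_runs _ (hne_line _ _ (by omega))]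
    unfold pvAntiLine
    rw [show (c.length : Int) - 1 + y - (c.length : Int) + 1 = y from by ring,
      show max 0 y = y from by omega,
      show (c.length : Int) - 1 + y - y = (c.length : Int) - 1 from by ring]
  -- singleton lines contribute nothing
  have hDgSing : (c.length : Int) ≠ 1 → runsDansLigne (pvDiagLine c ((c.length : Int) - 1)) = 0 := by
    intro h
    unfold pvDiagLine
    rw [show max 0 ((c.length : Int) - 1) = (c.length : Int) - 1 from by omega,
      show min ((c.length : Int) - ((c.length : Int) - 1))
          (((PySem.List.pyGetD c 0 []).length : Int) - max 0 (-((c.length : Int) - 1))) = 1 from by omega,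
      show PySem.List.pyRange (0 : Int) 1 1 = [(0 : Int)] from by decide]
    rw [List.map_cons, List.map_nil, runsDansLigne_singleton]
  have hAnSing : runsDansLigne (pvAntiLine c 0) = 0 := by
    unfold pvAntiLine
    rw [show max 0 (0 - (c.length : Int) + 1) = 0 from by omega,
      show min ((0 : Int) - 0 + 1) (((PySem.List.pyGetD c 0 []).length : Int) - 0) = 1 from by omega,
      show PySem.List.pyRange (0 : Int) 1 1 = [(0 : Int)] from by decide]
    rw [List.map_cons, List.map_nil, runsDansLigne_singleton]
  -- B's four family sums as Finset sums
  have hBrow : (c.map (fun row => runsDansLigne row)).sum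
      = ∑ x ∈ Finset.Ico 0 (c.length : Int), runsDansLigne (pvRowLine c x) := by
    rw [map_eq_map_pyRange c (fun row => runsDansLigne row), sum_map_pyRange]
    refine Finset.sum_congr rfl fun x hx => ?_
    rw [Finset.mem_Ico] at hx
    rw [hrowline x hx.1 hx.2]
  have hBcol : ((PySem.List.pyRange 0 ((PySem.List.pyGetD c 0 []).length : Int) 1).map (fun y =>
        runsDansLigne (c.map (fun row => PySem.List.pyGetD row y 0)))).sum
      = ∑ y ∈ Finset.Ico 0 ((PySem.List.pyGetD c 0 []).length : Int),
          runsDansLigne (pvColLine c y) := by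
    rw [sum_map_pyRange]
    refine Finset.sum_congr rfl fun y _ => ?_
    rw [map_eq_map_pyRange c (fun row => PySem.List.pyGetD row y 0)]
    rfl
  have hBdiag : ((PySem.List.pyRange (-(((PySem.List.pyGetD c 0 []).length : Int) - 1))
        (c.length : Int) 1).map (fun k =>
        runsDansLigne ((PySem.List.pyRange (max 0 k)
          (min (c.length : Int) (((PySem.List.pyGetD c 0 []).length : Int) + k)) 1).map
          (fun x => pvCell c x (x - k))))).sum
      = ∑ k ∈ Finset.Ico (1 - ((PySem.List.pyGetD c 0 []).length : Int)) (c.length : Int),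
          runsDansLigne (pvDiagLine c k) := by
    rw [show -(((PySem.List.pyGetD c 0 []).length : Int) - 1)
        = 1 - ((PySem.List.pyGetD c 0 []).length : Int) from by ring, sum_map_pyRange]
    refine Finset.sum_congr rfl fun k _ => ?_
    rw [map_pyRange_shift (fun x => pvCell c x (x - k)) (max 0 k)]
    unfold pvDiagLine
    rw [show min (c.length : Int) (((PySem.List.pyGetD c 0 []).length : Int) + k) - max 0 k
        = min ((c.length : Int) - max 0 k)
            (((PySem.List.pyGetD c 0 []).length : Int) - max 0 (-k)) from by omega]
    refine congrArg _ (List.map_congr_left fun t _ => ?_)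
    congr 1
    omega
  have hBanti : ((PySem.List.pyRange 0
        ((c.length : Int) + ((PySem.List.pyGetD c 0 []).length : Int) - 1) 1).map (fun s =>
        runsDansLigne ((PySem.List.pyRange (max 0 (s - (c.length : Int) + 1))
          (min ((PySem.List.pyGetD c 0 []).length : Int) (s + 1)) 1).map
          (fun y => pvCell c (s - y) y)))).sum
      = ∑ s ∈ Finset.Ico 0 ((c.length : Int) + ((PySem.List.pyGetD c 0 []).length : Int) - 1),
          runsDansLigne (pvAntiLine c s) := by
    rw [sum_map_pyRange]
    refine Finset.sum_congr rfl fun s _ => ?_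
    rw [map_pyRange_shift (fun y => pvCell c (s - y) y) (max 0 (s - (c.length : Int) + 1))]
    unfold pvAntiLine
    rw [show min ((PySem.List.pyGetD c 0 []).length : Int) (s + 1)
          - max 0 (s - (c.length : Int) + 1)
        = min (s - max 0 (s - (c.length : Int) + 1) + 1)
            (((PySem.List.pyGetD c 0 []).length : Int)
              - max 0 (s - (c.length : Int) + 1)) from by
      by_cases hcase : s - (c.length : Int) + 1 ≤ 0
      · rw [max_eq_left hcase]; omega
      · rw [max_eq_right (by omega)]; omega]
    refine congrArg _ (List.map_congr_left fun t _ => ?_)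
    rw [show s - (max 0 (s - (c.length : Int) + 1) + t)
        = s - max 0 (s - (c.length : Int) + 1) - t from by ring]
  -- assemble
  simp only [calculerScoreCreature, calculerScoreCreature_alt, Prod.mk.injEq]
  refine ⟨by trivial, ?_⟩
  rw [hBrow, hBcol, hBdiag, hBanti]
  rw [PySem.List.foldl_append_eq_flatMap, PySem.List.foldl_append_eq_flatMap,
    List.sum_append, List.sum_append, sum_if_append, sum_flatMap_triple, sum_flatMap_triple,
    sum_map_pyRange, sum_map_pyRange]
  simp only [List.sum_cons, List.sum_nil, add_zero]
  rw [hSrow 0 (by omega) (by omega), hSrow ((c.length : Int) - 1) (by omega) (by omega)]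
  have hmid : ∑ x ∈ Finset.Ico 1 ((c.length : Int) - 1),
        (scoreRangeeCreature c x 0 0 1
          + (scoreRangeeCreature c x 0 1 1 + scoreRangeeCreature c x 0 (-1) 1))
      = ∑ x ∈ Finset.Ico 1 ((c.length : Int) - 1),
          (runsDansLigne (pvRowLine c x)
            + (runsDansLigne (pvDiagLine c x) + runsDansLigne (pvAntiLine c x))) := by
    refine Finset.sum_congr rfl fun x hx => ?_
    rw [Finset.mem_Ico] at hx
    rw [hSrow x (by omega) (by omega), hSdiag1 x (by omega) (by omega),
      hSanti1 x (by omega) (by omega)]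
  have hylo : ∑ y ∈ Finset.Ico 0 ((PySem.List.pyGetD c 0 []).length : Int),
        (scoreRangeeCreature c 0 y 1 0
          + (scoreRangeeCreature c 0 y 1 1
            + scoreRangeeCreature c ((c.length : Int) - 1) y (-1) 1))
      = ∑ y ∈ Finset.Ico 0 ((PySem.List.pyGetD c 0 []).length : Int),
          (runsDansLigne (pvColLine c y)
            + (runsDansLigne (pvDiagLine c (-y))
              + runsDansLigne (pvAntiLine c ((c.length : Int) - 1 + y)))) := by
    refine Finset.sum_congr rfl fun y hy => ?_
    rw [Finset.mem_Ico] at hy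
    rw [hScol y (by omega) (by omega), hSdiag2 y (by omega) (by omega),
      hSanti2 y (by omega) (by omega)]
  rw [hmid, hylo]
  have e1 : ∑ x ∈ Finset.Ico 1 ((c.length : Int) - 1),
        (runsDansLigne (pvRowLine c x)
          + (runsDansLigne (pvDiagLine c x) + runsDansLigne (pvAntiLine c x)))
      = (∑ x ∈ Finset.Ico 1 ((c.length : Int) - 1), runsDansLigne (pvRowLine c x))
        + ((∑ x ∈ Finset.Ico 1 ((c.length : Int) - 1), runsDansLigne (pvDiagLine c x))
          + ∑ x ∈ Finset.Ico 1 ((c.length : Int) - 1), runsDansLigne (pvAntiLine c x)) := by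
    rw [Finset.sum_add_distrib, Finset.sum_add_distrib]
  have e2 : ∑ y ∈ Finset.Ico 0 ((PySem.List.pyGetD c 0 []).length : Int),
        (runsDansLigne (pvColLine c y)
          + (runsDansLigne (pvDiagLine c (-y))
            + runsDansLigne (pvAntiLine c ((c.length : Int) - 1 + y))))
      = (∑ y ∈ Finset.Ico 0 ((PySem.List.pyGetD c 0 []).length : Int),
            runsDansLigne (pvColLine c y))
        + ((∑ y ∈ Finset.Ico 0 ((PySem.List.pyGetD c 0 []).length : Int),
              runsDansLigne (pvDiagLine c (-y)))
          + ∑ y ∈ Finset.Ico 0 ((PySem.List.pyGetD c 0 []).length : Int),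
              runsDansLigne (pvAntiLine c ((c.length : Int) - 1 + y))) := by
    rw [Finset.sum_add_distrib, Finset.sum_add_distrib]
  have e3 : (∑ y ∈ Finset.Ico 0 ((PySem.List.pyGetD c 0 []).length : Int),
        runsDansLigne (pvDiagLine c (-y)))
      = ∑ k ∈ Finset.Ico (1 - ((PySem.List.pyGetD c 0 []).length : Int)) (1 : Int),
          runsDansLigne (pvDiagLine c k) := by
    exact sumIco_neg (fun k => runsDansLigne (pvDiagLine c k)) _
  have e4 : (∑ y ∈ Finset.Ico 0 ((PySem.List.pyGetD c 0 []).length : Int),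
        runsDansLigne (pvAntiLine c ((c.length : Int) - 1 + y)))
      = ∑ s ∈ Finset.Ico ((c.length : Int) - 1)
            ((c.length : Int) + ((PySem.List.pyGetD c 0 []).length : Int) - 1),
          runsDansLigne (pvAntiLine c s) := by
    rw [show (c.length : Int) + ((PySem.List.pyGetD c 0 []).length : Int) - 1
        = ((c.length : Int) - 1) + ((PySem.List.pyGetD c 0 []).length : Int) from by ring]
    exact sumIco_shift (fun s => runsDansLigne (pvAntiLine c s)) _ _
  have er : runsDansLigne (pvRowLine c 0)
        + (if (c.length : Int) ≠ 1 then runsDansLigne (pvRowLine c ((c.length : Int) - 1)) else 0)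
        + ∑ x ∈ Finset.Ico 1 ((c.length : Int) - 1), runsDansLigne (pvRowLine c x)
      = ∑ x ∈ Finset.Ico 0 (c.length : Int), runsDansLigne (pvRowLine c x) := by
    exact rows_split (fun x => runsDansLigne (pvRowLine c x)) _ hL1
  have ed : (∑ k ∈ Finset.Ico 1 ((c.length : Int) - 1), runsDansLigne (pvDiagLine c k))
        + ∑ k ∈ Finset.Ico (1 - ((PySem.List.pyGetD c 0 []).length : Int)) (1 : Int),
            runsDansLigne (pvDiagLine c k)
      = ∑ k ∈ Finset.Ico (1 - ((PySem.List.pyGetD c 0 []).length : Int)) (c.length : Int),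
          runsDansLigne (pvDiagLine c k) := by
    exact diag_cover (fun k => runsDansLigne (pvDiagLine c k)) _ _ hL1 hH1 hDgSing
  have ea : (∑ s ∈ Finset.Ico 1 ((c.length : Int) - 1), runsDansLigne (pvAntiLine c s))
        + ∑ s ∈ Finset.Ico ((c.length : Int) - 1)
            ((c.length : Int) + ((PySem.List.pyGetD c 0 []).length : Int) - 1),
            runsDansLigne (pvAntiLine c s)
      = ∑ s ∈ Finset.Ico 0 ((c.length : Int) + ((PySem.List.pyGetD c 0 []).length : Int) - 1),
          runsDansLigne (pvAntiLine c s) := by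
    exact anti_cover (fun s => runsDansLigne (pvAntiLine c s)) _ _ hL1 hH1 (fun _ => hAnSing)
  linarith [e1, e2, e3, e4, er, ed, ea]
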